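-- pv_equiv track=rewrite | github.com/amaurya9/Python_code | isSuperSet.py | isSuperSet
-- ===== SOURCE A (Python) =====
-- def isSuperSet(arrA,arrB):
--     hash = {}
--     for x in arrA:
--         if x not in hash:
--             hash[x] = 0
--         hash[x] += 1
--     for x in arrB:
--         if x not in hash or hash[x] == 0:
--             return False
--         hash[x] -= 1
--     return True
-- ===== SOURCE B (Python) =====
-- def isSuperSet(arrA, arrB):
--     a = sorted(arrA)
--     b = sorted(arrB)
--     i = 0
--     for x in b:
--         while i < len(a) and a[i] < x:
--             i += 1
--         if i >= len(a) or a[i] != x: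
--             return False
--         i += 1
--     return True
-- ===== Notes on version B (the rewrite author's own statement) =====
-- stated objective: alternative
-- what changed: Replaces A's hash-table counting with decrement by sorting both lists and checking containment with a two-pointer merge scan over the sorted lists.
import Mathlib
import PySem

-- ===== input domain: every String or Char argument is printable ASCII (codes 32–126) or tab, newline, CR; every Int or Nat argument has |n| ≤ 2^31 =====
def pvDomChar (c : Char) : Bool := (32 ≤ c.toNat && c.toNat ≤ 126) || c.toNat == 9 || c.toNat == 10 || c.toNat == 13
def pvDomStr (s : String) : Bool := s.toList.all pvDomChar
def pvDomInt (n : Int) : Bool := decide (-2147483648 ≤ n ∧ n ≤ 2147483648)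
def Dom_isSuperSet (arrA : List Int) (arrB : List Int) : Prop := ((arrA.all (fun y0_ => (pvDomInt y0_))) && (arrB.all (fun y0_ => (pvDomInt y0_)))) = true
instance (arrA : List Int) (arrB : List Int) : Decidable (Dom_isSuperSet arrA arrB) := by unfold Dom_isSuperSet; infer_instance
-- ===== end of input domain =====

-- B replaces A's decrementing hash-table pass by sorting both lists and a two-pointer
-- merge scan over the sorted lists — an alternative algorithm of similar cost; both total.

-- ===== PORT A =====
-- second loop of A: early return False becomes recursion returning Bool
def pvLoopB_isSuperSet (bs : List Int) (h : PySem.Dict Int Int) : Bool :=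
  match bs with
  | [] => true
  | x :: rest =>
    if !h.contains x || h.getD x 0 == 0 then false
    else pvLoopB_isSuperSet rest (h.modify x 0 (· - 1))

def isSuperSet (arrA : List Int) (arrB : List Int) : Bool :=
  let h := arrA.foldl (fun h x =>
    (if h.contains x then h else h.insert x 0).modify x 0 (· + 1)) PySem.Dict.empty
  pvLoopB_isSuperSet arrB h

-- ===== PORT B =====
-- Source B's for-loop over sorted b with index i into sorted a, as recursion on both lists:
-- the inner while (advance i past smaller a-elements) is the first branch.
def pvScan_isSuperSet (a : List Int) (b : List Int) : Bool :=
  match a, b with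
  | _, [] => true
  | [], _ :: _ => false
  | y :: ys, x :: xs =>
    if y < x then pvScan_isSuperSet ys (x :: xs)
    else if y ≠ x then false
    else pvScan_isSuperSet ys xs

def isSuperSet_alt (arrA : List Int) (arrB : List Int) : Bool :=
  pvScan_isSuperSet (PySem.List.sorted arrA (fun x => x) false)
                    (PySem.List.sorted arrB (fun x => x) false)

-- ===== PRECONDITION & SPEC =====
def Spec_isSuperSet (arrA : List Int) (arrB : List Int) (out : Bool) : Prop := out = isSuperSet_alt arrA arrB
instance (arrA : List Int) (arrB : List Int) (out : Bool) : Decidable (Spec_isSuperSet arrA arrB out) := by unfold Spec_isSuperSet; infer_instance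

-- ===== CLAIM (what is proved, stated in full; the proofs are below) =====
def Claim_equal_isSuperSet : Prop := ∀ (arrA : List Int) (arrB : List Int), Dom_isSuperSet arrA arrB → Spec_isSuperSet arrA arrB (isSuperSet arrA arrB)

-- ===== LEMMAS AND PROOFS =====

-- A's first loop computes exactly the multiset count of arrA (pointwise on getD)
theorem pv_foldA_getD (l : List Int) (d : PySem.Dict Int Int) (v : Int) :
    (l.foldl (fun h x => (if h.contains x then h else h.insert x 0).modify x 0 (· + 1)) d).getD v 0
      = d.getD v 0 + l.count v := by
  induction l generalizing d with
  | nil => simp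
  | cons x rest ih =>
    simp only [List.foldl_cons, ih, List.count_cons]
    have hstep : ((if d.contains x then d else d.insert x 0).modify x 0 (· + 1)).getD v 0
        = d.getD v 0 + (if v = x then 1 else 0) := by
      by_cases h1 : d.contains x
      · simp only [h1, if_true, PySem.Dict.getD_modify]
        split_ifs with hv <;> simp [hv]
      · have h1' : d.contains x = false := by simpa using h1
        have h0 : d.getD x 0 = 0 := PySem.Dict.getD_of_not_contains d 0 h1'
        simp only [h1', Bool.false_eq_true, if_false, PySem.Dict.getD_modify,
          PySem.Dict.getD_insert]
        split_ifs with hv <;> simp [hv, h0]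
    rw [hstep]
    by_cases hvx : v = x
    · subst hvx; simp; ring
    · have hxv : (x == v) = false := by
        simp only [beq_eq_false_iff_ne, ne_eq]; exact fun h => hvx h.symm
      simp [hvx, hxv]

-- characterisation of A's second loop: succeeds iff every remaining demand is covered
theorem pv_loopB_iff (bs : List Int) (d : PySem.Dict Int Int)
    (hnn : ∀ x, 0 ≤ d.getD x 0) :
    pvLoopB_isSuperSet bs d = true ↔ ∀ x, (bs.count x : Int) ≤ d.getD x 0 := by
  induction bs generalizing d with
  | nil => simpa [pvLoopB_isSuperSet] using hnn
  | cons x rest ih =>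
    have hcond : (!d.contains x || d.getD x 0 == 0) = (d.getD x 0 == 0) := by
      by_cases h : d.contains x
      · simp [h]
      · have h' : d.contains x = false := by simpa using h
        simp [h', PySem.Dict.getD_of_not_contains d 0 h']
    rw [pvLoopB_isSuperSet, hcond]
    by_cases hz : d.getD x 0 = 0
    · simp only [hz]
      constructor
      · intro h; simp at h
      · intro h
        have := h x
        simp [List.count_cons_self, hz] at this
        omega
    · have hz' : (d.getD x 0 == 0) = false := by simpa using hz
      rw [hz']
      simp only [Bool.false_eq_true, if_false]
      have hnn' : ∀ y, 0 ≤ (d.modify x 0 (· - 1)).getD y 0 := by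
        intro y
        rw [PySem.Dict.getD_modify]
        split_ifs with h
        · have := hnn x; omega
        · exact hnn y
      rw [ih _ hnn']
      constructor
      · intro h y
        have hy := h y
        rw [PySem.Dict.getD_modify] at hy
        rw [List.count_cons]
        by_cases hyx : y = x
        · subst hyx; simp at hy ⊢; omega
        · simp [hyx] at hy ⊢; omega
      · intro h y
        have hy := h y
        rw [PySem.Dict.getD_modify]
        rw [List.count_cons] at hy
        by_cases hyx : y = x
        · subst hyx; simp at hy ⊢; omega
        · simp [hyx] at hy ⊢; omega

-- characterisation of A
theorem pv_A_iff (arrA arrB : List Int) :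
    isSuperSet arrA arrB = true ↔ ∀ x, arrB.count x ≤ arrA.count x := by
  unfold isSuperSet
  rw [pv_loopB_iff]
  · constructor <;> intro h x <;> have := h x <;>
      · rw [pv_foldA_getD] at * <;> simp_all <;> omega
  · intro x
    rw [pv_foldA_getD]
    simp

-- the two-pointer scan on sorted lists decides multiset containment
theorem pv_scan_iff (a b : List Int)
    (ha : a.Pairwise (· ≤ ·)) (hb : b.Pairwise (· ≤ ·)) :
    pvScan_isSuperSet a b = true ↔ ∀ x, b.count x ≤ a.count x := by
  induction a generalizing b with
  | nil =>
    cases b with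
    | nil => simp [pvScan_isSuperSet]
    | cons x xs =>
      simp only [pvScan_isSuperSet, Bool.false_eq_true, false_iff, not_forall]
      exact ⟨x, by simp [List.count_cons]⟩
  | cons y ys ih =>
    cases b with
    | nil => simp [pvScan_isSuperSet]
    | cons x xs =>
      have ha' := (List.pairwise_cons.mp ha).2
      have haH := (List.pairwise_cons.mp ha).1
      have hb' := (List.pairwise_cons.mp hb).2
      have hbH := (List.pairwise_cons.mp hb).1
      rw [pvScan_isSuperSet]
      by_cases hlt : y < x
      · simp only [hlt, if_true]
        rw [ih (x :: xs) ha' hb]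
        have hy0 : (x :: xs).count y = 0 := by
          apply List.count_eq_zero_of_not_mem
          intro hmem
          rcases List.mem_cons.mp hmem with h | h
          · omega
          · have := hbH y h; omega
        have hyz : ∀ z, z ≠ y → (y :: ys).count z = ys.count z := by
          intro z hzy
          rw [List.count_cons]
          simp [Ne.symm hzy]
        constructor
        · intro h z
          have hz := h z
          rcases eq_or_ne z y with rfl | hzy
          · rw [hy0]; omega
          · rw [hyz z hzy]; exact hz
        · intro h z
          have hz := h z
          rcases eq_or_ne z y with rfl | hzy
          · rw [hy0]; omega
          · rw [hyz z hzy] at hz; exact hz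
      · simp only [hlt, if_false]
        by_cases heq : y = x
        · subst heq
          simp only [ne_eq, not_true_eq_false, if_false]
          rw [ih xs ha' hb']
          constructor
          · intro h z
            have hz := h z
            rw [List.count_cons, List.count_cons]
            split_ifs <;> omega
          · intro h z
            have hz := h z
            rw [List.count_cons, List.count_cons] at hz
            split_ifs at hz <;> omega
        · have hne : (y ≠ x) = True := by simp [heq]
          simp only [hne, if_true, Bool.false_eq_true, false_iff, not_forall]
          refine ⟨x, ?_⟩
          have hx0 : (y :: ys).count x = 0 := by
            apply List.count_eq_zero_of_not_mem
            intro hmem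
            rcases List.mem_cons.mp hmem with h | h
            · exact heq h.symm
            · have := haH x h; omega
          rw [hx0]
          simp [List.count_cons]

-- characterisation of B
theorem pv_B_iff (arrA arrB : List Int) :
    isSuperSet_alt arrA arrB = true ↔ ∀ x, arrB.count x ≤ arrA.count x := by
  unfold isSuperSet_alt
  rw [pv_scan_iff _ _ (by simpa using PySem.List.sorted_pairwise arrA (fun x => x))
      (by simpa using PySem.List.sorted_pairwise arrB (fun x => x))]
  constructor <;> intro h x <;> have := h x <;>
    simpa [(PySem.List.sorted_perm arrA (fun x => x) false).count_eq,
           (PySem.List.sorted_perm arrB (fun x => x) false).count_eq] using this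

-- ===== VERDICT (by name: the statement is the Claim_ definition above) =====
theorem isSuperSet_spec : Claim_equal_isSuperSet := by
  intro arrA arrB _
  unfold Spec_isSuperSet
  by_cases h : ∀ x, arrB.count x ≤ arrA.count x
  · rw [(pv_A_iff arrA arrB).2 h, ((pv_B_iff arrA arrB).2 h).symm]
  · have ha : isSuperSet arrA arrB = false := by
      rw [Bool.eq_false_iff]; intro ht; exact h ((pv_A_iff arrA arrB).1 ht)
    have hb : isSuperSet_alt arrA arrB = false := by
      rw [Bool.eq_false_iff]; intro ht; exact h ((pv_B_iff arrA arrB).1 ht)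
    rw [ha, hb]
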